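-- pv_equiv track=rewrite | github.com/hadoop2014/StudyOnCompany | docparser/docParserSql.py | _get_duplicated_field
-- ===== SOURCE A (Python) =====
-- def _get_duplicated_field(fieldList):
--     dictFieldDuplicate = dict(zip(fieldList,[0]*len(fieldList)))
--     def duplicate(fieldName):
--         dictFieldDuplicate.update({fieldName:dictFieldDuplicate[fieldName] + 1})
--         if dictFieldDuplicate[fieldName] > 1:
--             fieldName += str(dictFieldDuplicate[fieldName] - 1)
--         return fieldName
--
--     duplicatedField = [duplicate(fieldName) for fieldName in fieldList]
--     return duplicatedField
-- ===== SOURCE B (Python) =====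
-- def _get_duplicated_field(fieldList):
--     positions = {}
--     for i, name in enumerate(fieldList):
--         positions.setdefault(name, []).append(i)
--     result = list(fieldList)
--     for name, idxs in positions.items():
--         for j, i in enumerate(idxs):
--             result[i] = name if j == 0 else name + str(j)
--     return result
-- ===== Notes on version B (the rewrite author's own statement) =====
-- stated objective: alternative
-- what changed: Replaces A's single online pass with a closure-mutated running-count dict by a two-stage group-and-scatter: pass 1 groups the indices of each name, pass 2 scatters 'name'+str(j) for the j-th occurrence into a copy of the list by position, so no count travels with the output pass.
import Mathlib
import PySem

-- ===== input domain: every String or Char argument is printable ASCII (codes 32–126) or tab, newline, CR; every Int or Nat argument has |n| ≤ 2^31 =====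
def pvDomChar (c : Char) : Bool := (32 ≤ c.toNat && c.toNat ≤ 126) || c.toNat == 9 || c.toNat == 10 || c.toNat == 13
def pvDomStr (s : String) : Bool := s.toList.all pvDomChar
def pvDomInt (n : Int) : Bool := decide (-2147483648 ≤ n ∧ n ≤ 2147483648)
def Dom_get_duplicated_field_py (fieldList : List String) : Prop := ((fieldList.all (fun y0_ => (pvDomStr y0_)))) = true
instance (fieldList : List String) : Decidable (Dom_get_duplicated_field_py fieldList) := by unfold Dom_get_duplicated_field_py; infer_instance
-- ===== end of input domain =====

-- B replaces A's single counting pass by a two-stage group-and-scatter; objective: alternative (not faster).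

-- ===== PORT A =====
def get_duplicated_field_py (fieldList : List String) : List String :=
  -- dictFieldDuplicate = dict(zip(fieldList, [0]*len(fieldList)))
  let dict0 : PySem.Dict String Int :=
    PySem.Dict.ofList (fieldList.zip (List.replicate fieldList.length (0 : Int)))
  -- list comprehension calling the mutating closure `duplicate`
  (fieldList.foldl
    (fun (st : PySem.Dict String Int × List String) fieldName =>
      -- dictFieldDuplicate.update({fieldName: dictFieldDuplicate[fieldName] + 1})
      -- (the key is always present, so getD never falls back to its default)
      let d := st.1.insert fieldName (st.1.getD fieldName 0 + 1)
      let n := d.getD fieldName 0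
      (d, st.2 ++ [if n > 1 then fieldName ++ PySem.Int.toStr (n - 1) else fieldName]))
    (dict0, ([] : List String))).2

-- ===== PORT B =====
def get_duplicated_field_py_alt (fieldList : List String) : List String :=
  -- pass 1: positions[name] = list of indices of name (setdefault(name, []).append(i))
  let positions : PySem.Dict String (List Int) :=
    (PySem.List.enumerate fieldList).foldl
      (fun d p => d.modify p.2 [] (fun xs => xs ++ [p.1])) PySem.Dict.empty
  -- pass 2: result = list(fieldList); result[i] = name if j == 0 else name + str(j)
  positions.items.foldl
    (fun res q =>
      (PySem.List.enumerate q.2).foldl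
        (fun res r =>
          PySem.List.pySetD res r.2
            (if r.1 == 0 then q.1 else q.1 ++ PySem.Int.toStr r.1)) res)
    fieldList

-- ===== PRECONDITION & SPEC =====
def Spec_get_duplicated_field_py (fieldList : List String) (out : List String) : Prop := out = get_duplicated_field_py_alt fieldList
instance (fieldList : List String) (out : List String) : Decidable (Spec_get_duplicated_field_py fieldList out) := by unfold Spec_get_duplicated_field_py; infer_instance

-- ===== CLAIM (what is proved, stated in full; the proofs are below) =====
def Claim_equal_get_duplicated_field_py : Prop := ∀ (fieldList : List String), Dom_get_duplicated_field_py fieldList → Spec_get_duplicated_field_py fieldList (get_duplicated_field_py fieldList)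

-- ===== LEMMAS AND PROOFS =====

-- the common pointwise target: element k is l[k] suffixed by the count of l[k] before position k
def pvSuffix (name : String) (c : Nat) : String :=
  if c = 0 then name else name ++ PySem.Int.toStr (c : Int)

def pvTarget (l : List String) (k : Nat) : String :=
  pvSuffix (l.getD k "") ((l.take k).count (l.getD k ""))

-- ---------- A side: the loop realises a prefix-count walk ----------
def pvDedupSpec (seen rest : List String) : List String :=
  match rest with
  | [] => []
  | n :: r => pvSuffix n (seen.count n) :: pvDedupSpec (seen ++ [n]) r

theorem pvDict0_getD (ps : List (String × Int)) (hz : ∀ p ∈ ps, p.2 = 0) (k : String) :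
    (PySem.Dict.ofList ps).getD k 0 = 0 := by
  show (ps.foldl (fun d p => d.insert p.1 p.2) PySem.Dict.empty).getD k 0 = 0
  have : ∀ (l : List (String × Int)) (d : PySem.Dict String Int),
      (∀ j, d.getD j 0 = 0) → (∀ p ∈ l, p.2 = 0) →
      ∀ j, (l.foldl (fun d p => d.insert p.1 p.2) d).getD j 0 = 0 := by
    intro l
    induction l with
    | nil => intro d hd _ j; simpa using hd j
    | cons p r ih =>
      intro d hd hz j
      simp only [List.foldl_cons]
      refine ih _ (fun j => ?_) (fun q hq => hz q (List.mem_cons_of_mem _ hq)) j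
      rw [PySem.Dict.getD_insert]
      split_ifs with h
      · exact hz p (List.mem_cons_self)
      · exact hd j
  exact this ps _ (fun j => rfl) hz k

theorem pvA_loop (rest : List String) : ∀ (d : PySem.Dict String Int) (acc seen : List String),
    (∀ k, d.getD k 0 = (seen.count k : Int)) →
    (rest.foldl
      (fun (st : PySem.Dict String Int × List String) fieldName =>
        let d := st.1.insert fieldName (st.1.getD fieldName 0 + 1)
        let n := d.getD fieldName 0
        (d, st.2 ++ [if n > 1 then fieldName ++ PySem.Int.toStr (n - 1) else fieldName]))
      (d, acc)).2 = acc ++ pvDedupSpec seen rest := by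
  induction rest with
  | nil => intro d acc seen _; simp [pvDedupSpec]
  | cons n r ih =>
    intro d acc seen hinv
    simp only [List.foldl_cons]
    have hn : (d.insert n (d.getD n 0 + 1)).getD n 0 = (seen.count n : Int) + 1 := by
      rw [PySem.Dict.getD_insert, hinv]; simp
    have hstep :
        (r.foldl
          (fun (st : PySem.Dict String Int × List String) fieldName =>
            let d := st.1.insert fieldName (st.1.getD fieldName 0 + 1)
            let n := d.getD fieldName 0
            (d, st.2 ++ [if n > 1 then fieldName ++ PySem.Int.toStr (n - 1) else fieldName]))
          (d.insert n (d.getD n 0 + 1),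
            acc ++ [if (d.insert n (d.getD n 0 + 1)).getD n 0 > 1 then
                      n ++ PySem.Int.toStr ((d.insert n (d.getD n 0 + 1)).getD n 0 - 1)
                    else n])).2
        = (acc ++ [if (d.insert n (d.getD n 0 + 1)).getD n 0 > 1 then
                      n ++ PySem.Int.toStr ((d.insert n (d.getD n 0 + 1)).getD n 0 - 1)
                    else n]) ++ pvDedupSpec (seen ++ [n]) r := by
      apply ih
      intro k
      rw [PySem.Dict.getD_insert, hinv]
      by_cases hk : k = n
      · subst hk; simp [List.count_append]
      · simp [hk, List.count_append, Ne.symm hk, hinv k]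
    refine hstep.trans ?_
    rw [List.append_assoc]
    congr 1
    have hhead : (if (d.insert n (d.getD n 0 + 1)).getD n 0 > 1 then
            n ++ PySem.Int.toStr ((d.insert n (d.getD n 0 + 1)).getD n 0 - 1) else n)
        = pvSuffix n (seen.count n) := by
      rw [hn]
      by_cases hc : seen.count n = 0
      · simp [pvSuffix, hc]
      · have h1 : ((seen.count n : Int) + 1) > 1 := by
          have : (1 : Int) ≤ (seen.count n : Int) := by exact_mod_cast Nat.one_le_iff_ne_zero.mpr hc
          omega
        simp [pvSuffix, hc, h1]
    rw [hhead]; rfl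

theorem pvA_spec (l : List String) : get_duplicated_field_py l = pvDedupSpec [] l := by
  unfold get_duplicated_field_py
  exact pvA_loop l _ [] []
    (fun k => by simpa using pvDict0_getD _ (fun p hp => by
      have := List.of_mem_zip hp
      exact List.eq_of_mem_replicate this.2) k)

theorem pvDedup_length (rest : List String) : ∀ seen, (pvDedupSpec seen rest).length = rest.length := by
  induction rest with
  | nil => intro seen; rfl
  | cons n r ih => intro seen; simp [pvDedupSpec, ih]

theorem pvDedup_getElem? (rest : List String) : ∀ (seen : List String) (k : Nat), k < rest.length →
    (pvDedupSpec seen rest)[k]? =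
      some (pvSuffix (rest.getD k "") ((seen ++ rest.take k).count (rest.getD k ""))) := by
  induction rest with
  | nil => intro seen k hk; simp at hk
  | cons n r ih =>
    intro seen k hk
    match k with
    | 0 => simp [pvDedupSpec]
    | Nat.succ k' =>
      have hk' : k' < r.length := by simpa using hk
      simp only [pvDedupSpec, List.getElem?_cons_succ]
      rw [ih (seen ++ [n]) k' hk']
      simp [List.append_assoc]

-- ---------- B side ----------
-- indices of `name` in l, enumerated from s
def pvIdx (l : List String) (s : Int) (name : String) : List Int :=
  ((PySem.List.enumerate l s).filter (fun p => p.2 == name)).map (·.1)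

theorem pvIdx_cons (x : String) (r : List String) (s : Int) (name : String) :
    pvIdx (x :: r) s name = (if x == name then [s] else []) ++ pvIdx r (s + 1) name := by
  unfold pvIdx
  rw [PySem.List.enumerate_cons]
  by_cases h : x == name <;> simp [h]

theorem pvIdx_mem (l : List String) : ∀ (s : Int) (name : String) (i : Int), i ∈ pvIdx l s name →
    s ≤ i ∧ i < s + l.length ∧ l.getD (i - s).toNat "" = name := by
  induction l with
  | nil => intro s name i h; simp [pvIdx, PySem.List.enumerate_nil] at h
  | cons x r ih =>
    intro s name i h
    rw [pvIdx_cons] at h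
    rcases List.mem_append.mp h with h | h
    · have hx : (x == name) = true := by
        by_contra hc
        rw [Bool.not_eq_true] at hc
        simp [hc] at h
      have hi : i = s := by simpa [hx] using h
      subst hi
      refine ⟨le_refl _, ?_, by simpa using (eq_of_beq hx)⟩
      have : 0 < (x :: r).length := by simp
      omega
    · obtain ⟨h1, h2, h3⟩ := ih (s + 1) name i h
      have hlen : ((x :: r).length : Int) = (r.length : Int) + 1 := by simp
      refine ⟨by omega, by rw [hlen]; omega, ?_⟩
      have hnat : (i - s).toNat = (i - (s + 1)).toNat + 1 := by omega
      rw [hnat]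
      simpa using h3

theorem pvIdx_nodup (l : List String) (s : Int) (name : String) : (pvIdx l s name).Nodup := by
  have hsub : List.Sublist (pvIdx l s name) ((PySem.List.enumerate l s).map (·.1)) :=
    List.Sublist.map _ List.filter_sublist
  have : ((PySem.List.enumerate l s).map (·.1)).Nodup := by
    rw [PySem.List.map_fst_enumerate]
    exact PySem.List.nodup_pyRange_one _ _
  exact this.sublist hsub

-- the (count)-th index of name = l[k] is k itself
theorem pvIdx_getElem_count (l : List String) : ∀ (s : Int) (k : Nat) (hk : k < l.length),
    (pvIdx l s l[k])[(l.take k).count l[k]]? = some (s + k) := by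
  induction l with
  | nil => intro s k hk; simp at hk
  | cons x r ih =>
    intro s k hk
    match k with
    | 0 => simp [pvIdx_cons]
    | Nat.succ k' =>
      have hk' : k' < r.length := by simpa using hk
      have hgd : (x :: r)[k' + 1] = r[k'] := by simp
      rw [hgd, pvIdx_cons]
      by_cases hx : (x == r[k']) = true
      · have hcnt : ((x :: r).take (k' + 1)).count r[k'] =
            (r.take k').count r[k'] + 1 := by
          rw [List.take_succ_cons, List.count_cons]
          simp [eq_of_beq hx]
        rw [hcnt]
        simp only [hx, if_true, List.singleton_append, List.getElem?_cons_succ]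
        rw [ih (s + 1) k' hk']
        congr 1
        push_cast; ring
      · have hx' : (x == r[k']) = false := by simpa using hx
        have hxne : ¬ (x = r[k']) := by simpa using hx'
        have hcnt : ((x :: r).take (k' + 1)).count r[k'] =
            (r.take k').count r[k'] := by
          rw [List.take_succ_cons, List.count_cons]
          simp [hxne]
        rw [hcnt]
        simp only [hx', Bool.false_eq_true, if_false, List.nil_append]
        rw [ih (s + 1) k' hk']
        congr 1
        push_cast; ring

-- generic scatter: fold of writes at distinct nonnegative indices
theorem pvScatter_length (ws : List (Int × String)) : ∀ (res : List String),
    (ws.foldl (fun res r => PySem.List.pySetD res r.1 r.2) res).length = res.length := by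
  induction ws with
  | nil => intro res; rfl
  | cons r ws ih => intro res; simp [List.foldl_cons, ih, PySem.List.length_pySetD]

theorem pvScatter_not_mem (ws : List (Int × String)) : ∀ (res : List String) (k : Nat),
    (∀ r ∈ ws, 0 ≤ r.1) → (∀ r ∈ ws, r.1 ≠ (k : Int)) →
    (ws.foldl (fun res r => PySem.List.pySetD res r.1 r.2) res)[k]? = res[k]? := by
  induction ws with
  | nil => intro res k _ _; rfl
  | cons r ws ih =>
    intro res k hpos hne
    simp only [List.foldl_cons]
    rw [ih _ k (fun r hr => hpos r (List.mem_cons_of_mem _ hr))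
          (fun r hr => hne r (List.mem_cons_of_mem _ hr))]
    rw [PySem.List.pySetD_of_nonneg _ _ (hpos r List.mem_cons_self)]
    apply List.getElem?_set_ne
    have h1 := hpos r List.mem_cons_self
    have h2 := hne r List.mem_cons_self
    omega

theorem pvScatter_getElem? (ws : List (Int × String)) : ∀ (res : List String) (k : Nat),
    (∀ r ∈ ws, 0 ≤ r.1) → (ws.map Prod.fst).Nodup →
    (ws.foldl (fun res r => PySem.List.pySetD res r.1 r.2) res)[k]? =
      match ws.find? (fun r => r.1 == (k : Int)) with
      | some r => if k < res.length then some r.2 else none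
      | none => res[k]? := by
  induction ws with
  | nil => intro res k _ _; rfl
  | cons r ws ih =>
    intro res k hpos hnd
    simp only [List.foldl_cons, List.find?_cons]
    by_cases hr : r.1 = (k : Int)
    · simp only [hr, beq_self_eq_true]
      rw [pvScatter_not_mem ws _ k (fun r hr => hpos r (List.mem_cons_of_mem _ hr)) ?hne]
      case hne =>
        intro r' hr' he
        have : (k : Int) ∈ ws.map Prod.fst := by
          exact List.mem_map.mpr ⟨r', hr', he⟩
        rw [List.map_cons] at hnd
        exact (List.nodup_cons.mp hnd).1 (hr ▸ this)
      rw [PySem.List.pySetD_of_nonneg _ _ (by exact_mod_cast Int.natCast_nonneg k)]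
      simp [List.getElem?_set]
    · have hbeq : (r.1 == (k : Int)) = false := by simpa using hr
      simp only [hbeq]
      rw [ih _ k (fun r hr => hpos r (List.mem_cons_of_mem _ hr))
            (by rw [List.map_cons] at hnd; exact (List.nodup_cons.mp hnd).2)]
      have hlen : (PySem.List.pySetD res r.1 r.2).length = res.length :=
        PySem.List.length_pySetD _ _ _
      have hget : (PySem.List.pySetD res r.1 r.2)[k]? = res[k]? := by
        rw [PySem.List.pySetD_of_nonneg _ _ (hpos r List.mem_cons_self)]
        apply List.getElem?_set_ne
        have := hpos r List.mem_cons_self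
        omega
      cases ws.find? (fun r => r.1 == (k : Int)) with
      | none => exact hget
      | some w => simp [hlen]

theorem pvFind?_of_nodup (ws : List (Int × String)) : ∀ (k : Int) (v : String),
    (ws.map Prod.fst).Nodup → (k, v) ∈ ws → ws.find? (fun r => r.1 == k) = some (k, v) := by
  induction ws with
  | nil => intro k v _ hm; simp at hm
  | cons r ws ih =>
    intro k v hnd hm
    rw [List.find?_cons]
    rcases List.mem_cons.mp hm with h | h
    · subst h; simp
    · have hne : r.1 ≠ k := by
        intro he
        rw [List.map_cons] at hnd
        exact (List.nodup_cons.mp hnd).1 (he ▸ List.mem_map.mpr ⟨(k, v), h, rfl⟩)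
      have : (r.1 == k) = false := by simpa using hne
      rw [this]
      simp only []
      exact ih k v (by rw [List.map_cons] at hnd; exact (List.nodup_cons.mp hnd).2) h

theorem pvMem_enumerate_of_getElem? (idxs : List Int) : ∀ (s : Int) (j : Nat) (i : Int),
    idxs[j]? = some i → (s + j, i) ∈ PySem.List.enumerate idxs s := by
  induction idxs with
  | nil => intro s j i h; simp at h
  | cons x r ih =>
    intro s j i h
    rw [PySem.List.enumerate_cons]
    match j with
    | 0 =>
      simp at h
      simp [h]
    | Nat.succ j' =>
      rw [List.getElem?_cons_succ] at h
      have := ih (s + 1) j' i h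
      apply List.mem_cons_of_mem
      have harith : s + (1 : Int) + (j' : Int) = s + ((j' : Nat) + 1 : Nat) := by push_cast; ring
      rwa [harith] at this

-- the inner scatter loop of B, pointwise
theorem pvInner (l : List String) (name : String) (res : List String) (k : Nat)
    (hlen : res.length = l.length) (hk : k < l.length) :
    ((PySem.List.enumerate (pvIdx l 0 name)).foldl
      (fun res r => PySem.List.pySetD res r.2
        (if r.1 == 0 then name else name ++ PySem.Int.toStr r.1)) res)[k]? =
    if l.getD k "" = name then some (pvTarget l k) else res[k]? := by
  have hfold :
      (PySem.List.enumerate (pvIdx l 0 name)).foldl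
        (fun res r => PySem.List.pySetD res r.2
          (if r.1 == 0 then name else name ++ PySem.Int.toStr r.1)) res
      = ((PySem.List.enumerate (pvIdx l 0 name)).map
          (fun r => (r.2, if r.1 == 0 then name else name ++ PySem.Int.toStr r.1))).foldl
          (fun res r => PySem.List.pySetD res r.1 r.2) res := by
    rw [List.foldl_map]
  rw [hfold]
  set ws := ((PySem.List.enumerate (pvIdx l 0 name)).map
      (fun r => (r.2, if r.1 == 0 then name else name ++ PySem.Int.toStr r.1))) with hws
  have hwsfst : ws.map Prod.fst = pvIdx l 0 name := by
    rw [hws, List.map_map]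
    exact PySem.List.map_snd_enumerate _ _
  have hpos : ∀ r ∈ ws, 0 ≤ r.1 := by
    intro r hr
    have : r.1 ∈ pvIdx l 0 name := by
      rw [← hwsfst]; exact List.mem_map.mpr ⟨r, hr, rfl⟩
    exact (pvIdx_mem l 0 name r.1 this).1
  have hnd : (ws.map Prod.fst).Nodup := hwsfst ▸ pvIdx_nodup l 0 name
  rw [pvScatter_getElem? ws res k hpos hnd]
  by_cases hcase : l.getD k "" = name
  · -- the write ((k : Int), pvTarget l k) is in ws
    have hgd : l.getD k "" = l[k] := by
      rw [List.getD_eq_getElem?_getD, List.getElem?_eq_getElem hk]; rfl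
    have hname : l[k] = name := by rw [← hgd]; exact hcase
    have hidx : (pvIdx l 0 name)[(l.take k).count name]? = some ((k : Nat) : Int) := by
      have := pvIdx_getElem_count l 0 k hk
      rw [hname] at this
      simpa using this
    have hmemE : ((((l.take k).count name : Nat) : Int), ((k : Nat) : Int)) ∈
        PySem.List.enumerate (pvIdx l 0 name) := by
      have := pvMem_enumerate_of_getElem? (pvIdx l 0 name) 0 ((l.take k).count name) _ hidx
      simpa using this
    have hmem : (((k : Nat) : Int), pvTarget l k) ∈ ws := by
      rw [hws]
      refine List.mem_map.mpr ⟨_, hmemE, ?_⟩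
      simp only
      congr 1
      unfold pvTarget pvSuffix
      rw [hcase]
      by_cases hc : (l.take k).count name = 0
      · simp [hc]
      · have hne : ((((l.take k).count name : Nat)) : Int) ≠ 0 := by exact_mod_cast hc
        have hb : (((((l.take k).count name : Nat)) : Int) == 0) = false := by simpa using hne
        simp [hc, hb]
    rw [pvFind?_of_nodup ws _ _ hnd hmem]
    have hkr : k < res.length := by omega
    dsimp only
    rw [if_pos hkr, if_pos hcase]
  · -- no write touches k
    have hnone : ws.find? (fun r => r.1 == (k : Int)) = none := by
      rw [List.find?_eq_none]
      intro r hr he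
      have hi : r.1 ∈ pvIdx l 0 name := by
        rw [← hwsfst]; exact List.mem_map.mpr ⟨r, hr, rfl⟩
      obtain ⟨_, _, h3⟩ := pvIdx_mem l 0 name r.1 hi
      have : r.1 = (k : Int) := by simpa using he
      rw [this] at h3
      simp at h3
      exact hcase (by simpa using h3)
    rw [hnone, if_neg hcase]

theorem pvInner_length (l : List String) (name : String) (res : List String) :
    ((PySem.List.enumerate (pvIdx l 0 name)).foldl
      (fun res r => PySem.List.pySetD res r.2
        (if r.1 == 0 then name else name ++ PySem.Int.toStr r.1)) res).length = res.length := by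
  rw [List.foldl_map (f := fun r => ((r : Int × Int).2, if r.1 == 0 then name else name ++ PySem.Int.toStr r.1))
        (g := fun res (r : Int × String) => PySem.List.pySetD res r.1 r.2) |>.symm]
  exact pvScatter_length _ _

theorem pvOuter (l : List String) (N : List String) : ∀ (res : List String),
    res.length = l.length →
    (∀ k : Nat, k < l.length →
      ((N.foldl (fun res name =>
        (PySem.List.enumerate (pvIdx l 0 name)).foldl
          (fun res r => PySem.List.pySetD res r.2
            (if r.1 == 0 then name else name ++ PySem.Int.toStr r.1)) res) res))[k]? =
      if l.getD k "" ∈ N then some (pvTarget l k) else res[k]?) ∧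
    ((N.foldl (fun res name =>
        (PySem.List.enumerate (pvIdx l 0 name)).foldl
          (fun res r => PySem.List.pySetD res r.2
            (if r.1 == 0 then name else name ++ PySem.Int.toStr r.1)) res) res)).length = l.length := by
  induction N with
  | nil =>
    intro res hlen
    refine ⟨fun k hk => by simp, hlen⟩
  | cons name rest ih =>
    intro res hlen
    simp only [List.foldl_cons]
    have hlen' : ((PySem.List.enumerate (pvIdx l 0 name)).foldl
        (fun res r => PySem.List.pySetD res r.2
          (if r.1 == 0 then name else name ++ PySem.Int.toStr r.1)) res).length = l.length := by
      rw [pvInner_length]; exact hlen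
    obtain ⟨hpt, hln⟩ := ih _ hlen'
    refine ⟨fun k hk => ?_, hln⟩
    rw [hpt k hk]
    rw [pvInner l name res k hlen hk]
    by_cases h1 : l.getD k "" ∈ rest
    · rw [if_pos h1, if_pos (List.mem_cons_of_mem _ h1)]
    · rw [if_neg h1]
      by_cases h2 : l.getD k "" = name
      · rw [if_pos h2, if_pos (List.mem_cons.mpr (Or.inl h2))]
      · rw [if_neg h2, if_neg (fun hc => (List.mem_cons.mp hc).elim h2 h1)]

-- characterisation of B's grouping dict
theorem pvPositions_getD (l : List String) (name : String) :
    ((PySem.List.enumerate l).foldl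
      (fun d p => d.modify p.2 [] (fun xs => xs ++ [p.1])) PySem.Dict.empty).getD name []
    = pvIdx l 0 name := by
  have hswap : (PySem.List.enumerate l).foldl
      (fun d p => d.modify p.2 [] (fun xs => xs ++ [p.1])) (PySem.Dict.empty : PySem.Dict String (List Int))
      = ((PySem.List.enumerate l).map Prod.swap).foldl
          (fun d p => d.modify p.1 [] (fun xs => xs ++ [p.2])) PySem.Dict.empty := by
    rw [List.foldl_map]
    rfl
  rw [hswap, PySem.Dict.getD_foldl_modify_append]
  simp only [PySem.Dict.getD_empty, List.nil_append]
  unfold pvIdx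
  rw [List.filter_map, List.map_map]
  congr 1

theorem pvPositions_keys (l : List String) :
    ((PySem.List.enumerate l).foldl
      (fun d p => d.modify p.2 [] (fun xs => xs ++ [p.1])) (PySem.Dict.empty : PySem.Dict String (List Int))).keys
    = PySem.Set.ofList l := by
  rw [PySem.Dict.keys_foldl_modify_key]
  rw [PySem.Dict.keys_empty, PySem.List.map_snd_enumerate]
  exact PySem.Set.update_nil_left l

theorem pvPositions_keys_nodup (l : List String) :
    ((PySem.List.enumerate l).foldl
      (fun d p => d.modify p.2 [] (fun xs => xs ++ [p.1])) (PySem.Dict.empty : PySem.Dict String (List Int))).keys.Nodup := by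
  rw [pvPositions_keys]
  exact PySem.Set.nodup_ofList l

theorem pvB_getElem? (l : List String) :
    (∀ k : Nat, k < l.length → (get_duplicated_field_py_alt l)[k]? = some (pvTarget l k)) ∧
    (get_duplicated_field_py_alt l).length = l.length := by
  unfold get_duplicated_field_py_alt
  simp only
  set positions := (PySem.List.enumerate l).foldl
      (fun d p => d.modify p.2 [] (fun xs => xs ++ [p.1])) (PySem.Dict.empty : PySem.Dict String (List Int)) with hpos
  have hitems : positions.items = (PySem.Set.ofList l).map (fun name => (name, pvIdx l 0 name)) := by
    rw [PySem.Dict.items_eq_map_keys positions (pvPositions_keys_nodup l) []]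
    rw [pvPositions_keys]
    apply List.map_congr_left
    intro name _
    rw [hpos, pvPositions_getD]
  rw [hitems, List.foldl_map]
  have := pvOuter l (PySem.Set.ofList l) l rfl
  obtain ⟨hpt, hln⟩ := this
  constructor
  · intro k hk
    have hgd : l.getD k "" = l[k] := by
      rw [List.getD_eq_getElem?_getD, List.getElem?_eq_getElem hk]; rfl
    have hmem : l.getD k "" ∈ PySem.Set.ofList l := by
      rw [PySem.Set.mem_ofList, hgd]; exact List.getElem_mem hk
    rw [hpt k hk, if_pos hmem]
  · exact hln

-- ===== VERDICT (by name: the statement is the Claim_ definition above) =====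
theorem get_duplicated_field_py_spec : Claim_equal_get_duplicated_field_py := by
  intro l _
  show get_duplicated_field_py l = get_duplicated_field_py_alt l
  obtain ⟨hB, hBlen⟩ := pvB_getElem? l
  have hAlen : (get_duplicated_field_py l).length = l.length := by
    rw [pvA_spec]; exact pvDedup_length l []
  apply List.ext_getElem?
  intro k
  by_cases hk : k < l.length
  · rw [hB k hk, pvA_spec, pvDedup_getElem? l [] k hk]
    simp [pvTarget]
  · rw [List.getElem?_eq_none (by omega), List.getElem?_eq_none (by omega)]
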